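-- pv_equiv track=rewrite | github.com/RmndB/NLP-NER-app | main.py | named_entity_recognition
-- ===== SOURCE A (Python) =====
-- SYMBOL_NOT_ENTITY = 'O'
--
-- class NamedEntity:
--     label = ""
--     begin = 0
--     end = 0
--
--     def __init__(self, label, begin, end):
--         self.label = label
--         self.begin = begin
--         self.end = end
--
--     def getLabel(self):
--         return self.label
--
--     def getBegin(self):
--         return self.begin
--
--     def getEnd(self):
--         return self.end
--
--     def constructTriplet(self):
--         return self.begin, self.end, self.label
--
-- def build_up_training_data(doc, namedEntities):
--     train_data = []
--     i = 0
--     for sentence in doc: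
--         namedEntitiesForSentence = {}
--         if i in namedEntities.keys():
--             for namedEntityForSentence in namedEntities[i]:
--                 namedEntitiesForSentence.setdefault("entities", []).append(namedEntityForSentence.constructTriplet())
--         train_data.append((sentence, namedEntitiesForSentence))
--         i = i + 1
--     return train_data
--
-- def named_entity_recognition(raw_data):
--     namedEntities = {}
--     doc = []
--
--     i = 0
--     y = 0
--     sentence = ""
--     for pair in raw_data:
--         if len(pair) == 2:
--             if i == 0:
--                 sentence = pair[0]
--             else:
--                 sentence = sentence + " " + pair[0]
--
--             if pair[1] != SYMBOL_NOT_ENTITY: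
--                 namedEntities.setdefault(y, []).append(
--                     NamedEntity(pair[1], len(sentence) - len(pair[0]), len(sentence)))
--             i = i + 1
--         else:
--             i = 0
--             if sentence != "":
--                 doc.append(sentence)
--                 y = y + 1
--             sentence = ""
--     if sentence != "":
--         doc.append(sentence)
--
--     return build_up_training_data(doc, namedEntities)
-- ===== SOURCE B (Python) =====
-- def named_entity_recognition(raw_data):
--     # Single pass: build the result list directly, keeping the current sentence
--     # and its entity triplets; no per-sentence-index dict and no second merge pass.
--     train_data = []
--     sentence = ""
--     entities = []
--     first = True
--     for pair in raw_data:
--         if len(pair) == 2: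
--             tok, label = pair
--             sentence = tok if first else sentence + " " + tok
--             first = False
--             if label != 'O':
--                 entities.append((len(sentence) - len(tok), len(sentence), label))
--         else:
--             first = True
--             if sentence != "":
--                 train_data.append((sentence, {"entities": entities} if entities else {}))
--                 sentence = ""
--                 entities = []
--     if sentence != "":
--         train_data.append((sentence, {"entities": entities} if entities else {}))
--     return train_data
-- ===== Notes on version B (the rewrite author's own statement) =====
-- stated objective: simpler
-- what changed: B builds the (sentence, entities-dict) result list directly in one pass over the pairs, keeping the current sentence and its entity triplets, instead of A's sentence-index-keyed entity dict plus the NamedEntity class and a separate build_up_training_data merge pass.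
import Mathlib
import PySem

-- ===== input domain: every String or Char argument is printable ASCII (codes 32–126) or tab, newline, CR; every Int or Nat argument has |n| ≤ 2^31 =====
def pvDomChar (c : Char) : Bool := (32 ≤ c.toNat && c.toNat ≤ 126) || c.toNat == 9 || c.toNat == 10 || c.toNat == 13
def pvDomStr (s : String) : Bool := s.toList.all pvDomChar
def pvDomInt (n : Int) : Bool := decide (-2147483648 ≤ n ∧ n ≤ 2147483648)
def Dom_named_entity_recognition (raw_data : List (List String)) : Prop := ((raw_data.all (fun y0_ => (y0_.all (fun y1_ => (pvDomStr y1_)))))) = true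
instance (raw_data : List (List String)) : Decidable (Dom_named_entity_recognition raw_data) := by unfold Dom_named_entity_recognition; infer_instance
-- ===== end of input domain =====

-- B replaces A's y-indexed entity dict + separate build_up merge pass by one direct pass
-- that appends each finished (sentence, entities-dict) pair as it goes: simpler, same cost.

-- ===== PORT A =====
-- class NamedEntity
structure NamedEntity where
  label : String
  begin_ : Int
  end_ : Int
deriving Repr, DecidableEq

def constructTriplet (ne : NamedEntity) : Int × Int × String := (ne.begin_, ne.end_, ne.label)

-- inner loop of build_up_training_data: namedEntitiesForSentence.setdefault("entities", []).append(t)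
-- (setdefault + in-place list append = store get("entities", []) ++ [t] back under "entities")
def neForSentenceLoop (l : List NamedEntity) : PySem.Dict String (List (Int × Int × String)) :=
  l.foldl (fun e ne => e.insert "entities" (e.getD "entities" [] ++ [constructTriplet ne])) PySem.Dict.empty

-- the `for sentence in doc` loop of build_up_training_data (i is the running index)
def buildUpGo (ne : PySem.Dict Int (List NamedEntity)) :
    List String → Int → List (String × (List (String × List (Int × Int × String))))
  | [], _ => []
  | s :: rest, i =>
      let nfs :=                     -- if i in namedEntities.keys(): for … (absent key → {})
        match ne.get? i with
        | some l => neForSentenceLoop l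
        | none => PySem.Dict.empty
      (s, nfs.items) :: buildUpGo ne rest (i + 1)

def build_up_training_data (doc : List String) (ne : PySem.Dict Int (List NamedEntity)) :
    List (String × (List (String × List (Int × Int × String)))) :=
  buildUpGo ne doc 0

-- the main for-loop of A; sentence kept as List Char (Python str = sequence of code points)
def loopA : List (List String) → PySem.Dict Int (List NamedEntity) → List String → Int → Int →
    List Char → PySem.Dict Int (List NamedEntity) × List String × List Char
  | [], ne, doc, _, _, s => (ne, doc, s)
  | pair :: rest, ne, doc, i, y, s =>
    match pair with
    | [tok, lab] =>                                   -- len(pair) == 2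
        let s' := if i == 0 then tok.toList else s ++ [' '] ++ tok.toList
        let ne' :=
          if lab ≠ "O" then                           -- pair[1] != SYMBOL_NOT_ENTITY
            ne.insert y (ne.getD y [] ++
              [⟨lab, (s'.length : Int) - (tok.toList.length : Int), (s'.length : Int)⟩])
          else ne
        loopA rest ne' doc (i + 1) y s'
    | _ =>
        if s = [] then loopA rest ne doc 0 y []
        else loopA rest ne (doc ++ [String.ofList s]) 0 (y + 1) []

def named_entity_recognition (raw_data : List (List String)) :
    List (String × (List (String × List (Int × Int × String)))) :=
  let r := loopA raw_data PySem.Dict.empty [] 0 0 []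
  build_up_training_data (if r.2.2 = [] then r.2.1 else r.2.1 ++ [String.ofList r.2.2]) r.1

-- ===== PORT B =====
-- {"entities": entities} if entities else {}
def entDict (es : List (Int × Int × String)) : List (String × List (Int × Int × String)) :=
  if es = [] then [] else [("entities", es)]

def loopB : List (List String) → List (String × (List (String × List (Int × Int × String)))) →
    List Char → List (Int × Int × String) → Bool →
    List (String × (List (String × List (Int × Int × String))))
  | [], train, s, es, _ =>
      if s = [] then train else train ++ [(String.ofList s, entDict es)]
  | pair :: rest, train, s, es, first =>
    match pair with
    | [tok, lab] =>
        let s' := if first then tok.toList else s ++ [' '] ++ tok.toList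
        let es' :=
          if lab ≠ "O" then
            es ++ [((s'.length : Int) - (tok.toList.length : Int), (s'.length : Int), lab)]
          else es
        loopB rest train s' es' false
    | _ =>
        if s = [] then loopB rest train s es true
        else loopB rest (train ++ [(String.ofList s, entDict es)]) [] [] true

def named_entity_recognition_alt (raw_data : List (List String)) :
    List (String × (List (String × List (Int × Int × String)))) :=
  loopB raw_data [] [] [] true

-- ===== PRECONDITION & SPEC =====
def Spec_named_entity_recognition (raw_data : List (List String)) (out : List (String × (List (String × List (Int × Int × String))))) : Prop := out = named_entity_recognition_alt raw_data
instance (raw_data : List (List String)) (out : List (String × (List (String × List (Int × Int × String))))) : Decidable (Spec_named_entity_recognition raw_data out) := by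
  unfold Spec_named_entity_recognition
  haveI h3 : DecidableEq (String × List (String × List (Int × Int × String))) := instDecidableEqProd
  haveI h4 : DecidableEq (List (String × List (String × List (Int × Int × String)))) := instDecidableEqList
  exact h4 out (named_entity_recognition_alt raw_data)

-- ===== CLAIM (what is proved, stated in full; the proofs are below) =====
def Claim_equal_named_entity_recognition : Prop := ∀ (raw_data : List (List String)), Dom_named_entity_recognition raw_data → Spec_named_entity_recognition raw_data (named_entity_recognition raw_data)

-- ===== LEMMAS AND PROOFS =====

-- the inner setdefault/append loop builds exactly entDict of the triplet list
lemma neForSentenceLoop_go (l : List NamedEntity) :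
    ∀ acc : List (Int × Int × String),
    l.foldl (fun e ne => e.insert "entities" (e.getD "entities" [] ++ [constructTriplet ne]))
        (PySem.Dict.mk (entDict acc))
      = PySem.Dict.mk (entDict (acc ++ l.map constructTriplet)) := by
  induction l with
  | nil => intro acc; simp
  | cons ne rest ih =>
    intro acc
    have hstep : ((PySem.Dict.mk (entDict acc)).insert "entities"
        ((PySem.Dict.mk (entDict acc)).getD "entities" [] ++ [constructTriplet ne]))
        = PySem.Dict.mk (entDict (acc ++ [constructTriplet ne])) := by
      cases acc with
      | nil => simp [entDict]; rfl
      | cons h t => simp [entDict, PySem.Dict.insert, PySem.Dict.getD, PySem.Dict.get?,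
          PySem.Dict.contains]
    simp only [List.foldl_cons, hstep, ih, List.map_cons, List.append_assoc,
      List.singleton_append]

lemma neForSentenceLoop_items (l : List NamedEntity) :
    (neForSentenceLoop l).items = entDict (l.map constructTriplet) := by
  have h := neForSentenceLoop_go l []
  simp only [List.nil_append, show entDict [] = [] from rfl] at h
  rw [neForSentenceLoop, show (PySem.Dict.empty : PySem.Dict String (List (Int × Int × String))) = PySem.Dict.mk [] from rfl, h]

-- the per-sentence dict that buildUpGo looks up equals entDict of the mapped getD list
lemma inner_eq (ne : PySem.Dict Int (List NamedEntity)) (y : Int) :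
    (match ne.get? y with
      | some l => neForSentenceLoop l
      | none => PySem.Dict.empty).items = entDict (((ne.getD y []).map constructTriplet)) := by
  rcases h : ne.get? y with _ | l
  · rw [PySem.Dict.getD_eq_get?_getD, h]
    simp [entDict, PySem.Dict.empty]
  · rw [PySem.Dict.getD_eq_get?_getD, h]
    simp [neForSentenceLoop_items]

lemma buildUpGo_append (ne : PySem.Dict Int (List NamedEntity)) (doc : List String)
    (s : String) : ∀ i : Int,
    buildUpGo ne (doc ++ [s]) i =
      buildUpGo ne doc i ++
        [(s, (match ne.get? (i + doc.length) with
              | some l => neForSentenceLoop l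
              | none => PySem.Dict.empty).items)] := by
  induction doc with
  | nil => intro i; simp [buildUpGo]
  | cons d rest ih =>
    intro i
    simp only [List.cons_append, buildUpGo, ih (i + 1), List.length_cons]
    have : i + 1 + (rest.length : Int) = i + ((rest.length : Int) + 1) := by ring
    rw [this]
    push_cast
    ring_nf

-- inserting at a key at or above i + doc.length does not change buildUpGo
lemma buildUpGo_insert_high (ne : PySem.Dict Int (List NamedEntity)) (doc : List String)
    (y : Int) (v : List NamedEntity) : ∀ i : Int, i + doc.length ≤ y →
    buildUpGo (ne.insert y v) doc i = buildUpGo ne doc i := by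
  induction doc with
  | nil => intro i _; simp [buildUpGo]
  | cons d rest ih =>
    intro i h
    have hne : i ≠ y := by simp at h; omega
    simp only [buildUpGo, PySem.Dict.get?_insert_of_ne _ _ hne]
    rw [ih (i + 1) (by simp at h ⊢; omega)]

lemma main_loop (raw : List (List String)) :
    ∀ (ne : PySem.Dict Int (List NamedEntity)) (doc : List String) (i y : Int)
      (s : List Char) (train : List (String × (List (String × List (Int × Int × String)))))
      (es : List (Int × Int × String)),
    0 ≤ i →
    y = (doc.length : Int) →
    (∀ k, y < k → ne.get? k = none) →
    (ne.getD y []).map constructTriplet = es →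
    train = buildUpGo ne doc 0 →
    (let r := loopA raw ne doc i y s
     buildUpGo r.1 (if r.2.2 = [] then r.2.1 else r.2.1 ++ [String.ofList r.2.2]) 0)
      = loopB raw train s es (i == 0) := by
  induction raw with
  | nil =>
    intro ne doc i y s train es hi hy hk hes htr
    by_cases hs : s = []
    · simp [loopA, loopB, hs, htr]
    · have hB : loopB [] train s es (i == 0) = train ++ [(String.ofList s, entDict es)] := by
        simp [loopB, hs]
      have hA : loopA [] ne doc i y s = (ne, doc, s) := rfl
      rw [hA, hB]
      show buildUpGo ne (if s = [] then doc else doc ++ [String.ofList s]) 0 = _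
      rw [if_neg hs, buildUpGo_append, htr]
      have h0 : (0 : Int) + (doc.length : Int) = y := by omega
      rw [h0, inner_eq, hes]
  | cons pair rest ih =>
    intro ne doc i y s train es hi hy hk hes htr
    have hsep : ∀ p : List String, (∀ t l, p ≠ [t, l]) →
        (let r := loopA (p :: rest) ne doc i y s
         buildUpGo r.1 (if r.2.2 = [] then r.2.1 else r.2.1 ++ [String.ofList r.2.2]) 0)
          = loopB (p :: rest) train s es (i == 0) := by
      intro p hp
      have hA : loopA (p :: rest) ne doc i y s =
          (if s = [] then loopA rest ne doc 0 y []
           else loopA rest ne (doc ++ [String.ofList s]) 0 (y + 1) []) := by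
        rcases p with _ | ⟨t, _ | ⟨l, _ | ⟨c, cs⟩⟩⟩
        · rfl
        · rfl
        · exact absurd rfl (hp t l)
        · rfl
      have hB : loopB (p :: rest) train s es (i == 0) =
          (if s = [] then loopB rest train s es true
           else loopB rest (train ++ [(String.ofList s, entDict es)]) [] [] true) := by
        rcases p with _ | ⟨t, _ | ⟨l, _ | ⟨c, cs⟩⟩⟩
        · rfl
        · rfl
        · exact absurd rfl (hp t l)
        · rfl
      simp only [hA, hB]
      by_cases hs : s = []
      · simp only [hs, if_pos trivial]
        have := ih ne doc 0 y [] train es le_rfl hy hk hes htr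
        simpa using this
      · simp only [if_neg hs]
        have hy' : y + 1 = ((doc ++ [String.ofList s]).length : Int) := by
          simp; omega
        have hk' : ∀ k, y + 1 < k → ne.get? k = none := fun k h => hk k (by omega)
        have hes' : (ne.getD (y + 1) []).map constructTriplet = ([] : List (Int × Int × String)) := by
          rw [PySem.Dict.getD_eq_get?_getD, hk (y + 1) (by omega)]; rfl
        have htr' : train ++ [(String.ofList s, entDict es)] =
            buildUpGo ne (doc ++ [String.ofList s]) 0 := by
          rw [buildUpGo_append, ← htr]
          have h0 : (0 : Int) + (doc.length : Int) = y := by omega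
          rw [h0, inner_eq, hes]
        have := ih ne (doc ++ [String.ofList s]) 0 (y + 1) [] (train ++ [(String.ofList s, entDict es)])
          [] le_rfl hy' hk' hes' htr'
        simpa using this
    rcases pair with _ | ⟨tok, _ | ⟨lab, _ | ⟨c, cs⟩⟩⟩
    · exact hsep [] (by intro t l h; cases h)
    · exact hsep [tok] (by intro t l h; cases h)
    · -- token pair [tok, lab]
      have hfirst : ((i + 1 : Int) == 0) = false := by
        have : i + 1 ≠ 0 := by omega
        simpa using this
      simp only [loopA, loopB]
      by_cases hlab : lab = "O"
      · subst hlab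
        simp only [ne_eq, not_true_eq_false, reduceIte]
        have := ih ne doc (i + 1) y
          (if (i == 0) = true then tok.toList else s ++ [' '] ++ tok.toList)
          train es (by omega) hy hk hes htr
        rw [hfirst] at this
        simpa using this
      · simp only [ne_eq, hlab, not_false_eq_true, reduceIte]
        set s' := if (i == 0) = true then tok.toList else s ++ [' '] ++ tok.toList with hs'
        set nent : NamedEntity :=
          ⟨lab, (s'.length : Int) - (tok.toList.length : Int), (s'.length : Int)⟩ with hnent
        have hkey : ∀ k, y < k → (ne.insert y (ne.getD y [] ++ [nent])).get? k = none := by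
          intro k hkk
          rw [PySem.Dict.get?_insert_of_ne _ _ (by omega : k ≠ y)]
          exact hk k hkk
        have hes2 : ((ne.insert y (ne.getD y [] ++ [nent])).getD y []).map constructTriplet
            = es ++ [((s'.length : Int) - (tok.toList.length : Int), (s'.length : Int), lab)] := by
          rw [PySem.Dict.getD_insert_self, List.map_append, hes]
          rfl
        have htr2 : train = buildUpGo (ne.insert y (ne.getD y [] ++ [nent])) doc 0 := by
          rw [buildUpGo_insert_high ne doc y _ 0 (by omega), ← htr]
        have := ih (ne.insert y (ne.getD y [] ++ [nent])) doc (i + 1) y s' train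
          (es ++ [((s'.length : Int) - (tok.toList.length : Int), (s'.length : Int), lab)])
          (by omega) hy hkey hes2 htr2
        rw [hfirst] at this
        simpa using this
    · exact hsep (tok :: lab :: c :: cs) (by intro t l h; cases h)
-- ===== VERDICT (by name: the statement is the Claim_ definition above) =====
theorem named_entity_recognition_spec : Claim_equal_named_entity_recognition := by
  intro raw _
  unfold Spec_named_entity_recognition named_entity_recognition named_entity_recognition_alt
    build_up_training_data
  have := main_loop raw PySem.Dict.empty [] 0 0 [] [] []
    (le_refl 0) (by simp) (by intro k _; simp [pysem]) (by simp [pysem]) (by simp [buildUpGo])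
  simpa using this
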